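-- pv_equiv track=rewrite | github.com/KohsukeIde/concerto-shortcut-mvp | tools/concerto_projection_shortcut/fit_hlns_frozen.py | group_slices
-- ===== SOURCE A (Python) =====
-- def group_slices(feature_dim: int, num_groups: int):
--     base = feature_dim // num_groups
--     rem = feature_dim % num_groups
--     start = 0
--     out = []
--     for g in range(num_groups):
--         width = base + (1 if g < rem else 0)
--         end = start + width
--         out.append((start, end))
--         start = end
--     return out
-- ===== SOURCE B (Python) =====
-- def group_slices(feature_dim: int, num_groups: int):
--     base, rem = divmod(feature_dim, num_groups)
--     return [(g * base + min(g, rem), (g + 1) * base + min(g + 1, rem))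
--             for g in range(num_groups)]
-- ===== Notes on version B (the rewrite author's own statement) =====
-- stated objective: alternative
-- what changed: Replaces the loop that threads a running start accumulator through iterations with a closed-form expression computing each slice's boundaries directly from the group index g.
import Mathlib
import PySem

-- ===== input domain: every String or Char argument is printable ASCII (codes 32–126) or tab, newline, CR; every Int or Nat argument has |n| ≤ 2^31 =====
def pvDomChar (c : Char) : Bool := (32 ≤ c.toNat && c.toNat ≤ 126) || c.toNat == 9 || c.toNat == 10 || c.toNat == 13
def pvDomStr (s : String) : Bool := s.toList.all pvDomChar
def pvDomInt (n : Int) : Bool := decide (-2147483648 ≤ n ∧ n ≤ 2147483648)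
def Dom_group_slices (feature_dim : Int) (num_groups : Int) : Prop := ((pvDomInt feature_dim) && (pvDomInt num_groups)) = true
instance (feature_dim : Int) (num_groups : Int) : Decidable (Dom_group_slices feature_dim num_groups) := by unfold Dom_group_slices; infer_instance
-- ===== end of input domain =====

-- B computes each slice's boundaries by a closed form in the group index instead of
-- threading a running start through the loop (objective: alternative decomposition).

-- ===== PORT A =====
def group_slices (feature_dim : Int) (num_groups : Int) : List (Int × Int) :=
  let base := PySem.Int.floordiv feature_dim num_groups
  let rem := PySem.Int.mod feature_dim num_groups
  let st := (PySem.List.pyRange 0 num_groups 1).foldl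
    (fun (st : Int × List (Int × Int)) g =>
      let width := base + (if g < rem then (1 : Int) else 0)
      let endd := st.1 + width
      (endd, st.2 ++ [(st.1, endd)])) (0, [])
  st.2

-- ===== PORT B =====
def group_slices_alt (feature_dim : Int) (num_groups : Int) : List (Int × Int) :=
  let base := PySem.Int.floordiv feature_dim num_groups
  let rem := PySem.Int.mod feature_dim num_groups
  (PySem.List.pyRange 0 num_groups 1).map
    (fun g => (g * base + min g rem, (g + 1) * base + min (g + 1) rem))

-- ===== PRECONDITION & SPEC =====
-- Pre_ excludes num_groups = 0, where Python A raises ZeroDivisionError (B raises too).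
def Pre_group_slices (feature_dim : Int) (num_groups : Int) : Prop := num_groups ≠ 0
instance (feature_dim : Int) (num_groups : Int) : Decidable (Pre_group_slices feature_dim num_groups) := by unfold Pre_group_slices; infer_instance
def pvWitness_group_slices : Int × Int := (10, 3)
def Spec_group_slices (feature_dim : Int) (num_groups : Int) (out : List (Int × Int)) : Prop := out = group_slices_alt feature_dim num_groups
instance (feature_dim : Int) (num_groups : Int) (out : List (Int × Int)) : Decidable (Spec_group_slices feature_dim num_groups out) := by unfold Spec_group_slices; infer_instance

-- ===== CLAIM (what is proved, stated in full; the proofs are below) =====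
def Claim_equal_group_slices : Prop := ∀ (feature_dim : Int) (num_groups : Int), Dom_group_slices feature_dim num_groups → Pre_group_slices feature_dim num_groups → Spec_group_slices feature_dim num_groups (group_slices feature_dim num_groups)

-- ===== LEMMAS AND PROOFS =====

-- Loop invariant: after the first m iterations, the running start equals the closed form
-- and the accumulated list is the map of the closed form over the first m indices.
theorem group_slices_fold_inv (base rem : Int) (hr : 0 ≤ rem) (m : Nat) :
    (PySem.List.pyRange 0 (m : Int) 1).foldl
      (fun (st : Int × List (Int × Int)) g =>
        let width := base + (if g < rem then (1 : Int) else 0)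
        let endd := st.1 + width
        (endd, st.2 ++ [(st.1, endd)])) (0, [])
    = ((m : Int) * base + min (m : Int) rem,
       (PySem.List.pyRange 0 (m : Int) 1).map
         (fun g => (g * base + min g rem, (g + 1) * base + min (g + 1) rem))) := by
  induction m with
  | zero => simp [PySem.List.pyRange_one_eq_nil, min_eq_left hr]
  | succ k ih =>
    have h0 : (0 : Int) ≤ (k : Int) := Int.natCast_nonneg k
    have hsplit : PySem.List.pyRange 0 ((k : Int) + 1) 1
        = PySem.List.pyRange 0 (k : Int) 1 ++ [(k : Int)] :=
      PySem.List.pyRange_one_succ_right h0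
    have hc : ((k + 1 : Nat) : Int) = (k : Int) + 1 := by push_cast; ring
    rw [hc, hsplit, List.foldl_append, List.map_append, ih]
    simp only [List.foldl_cons, List.foldl_nil, List.map_cons, List.map_nil]
    have harith : (k : Int) * base + min (k : Int) rem + (base + if (k : Int) < rem then (1:Int) else 0)
        = ((k : Int) + 1) * base + min ((k : Int) + 1) rem := by
      rw [add_one_mul]; split_ifs with h <;> omega
    rw [harith]

theorem group_slices_eq_alt (feature_dim num_groups : Int) :
    group_slices feature_dim num_groups = group_slices_alt feature_dim num_groups := by
  unfold group_slices group_slices_alt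
  by_cases h : num_groups ≤ 0
  · rw [PySem.List.pyRange_one_eq_nil h]
    simp
  · have hpos : 0 < num_groups := by omega
    have hr : 0 ≤ PySem.Int.mod feature_dim num_groups := PySem.Int.mod_nonneg _ hpos
    have hm : ((num_groups.toNat : Int)) = num_groups := Int.toNat_of_nonneg (le_of_lt hpos)
    rw [← hm]
    simp only [group_slices_fold_inv _ _ (hm ▸ hr)]

-- ===== VERDICT (by name: the statement is the Claim_ definition above) =====
theorem group_slices_spec : Claim_equal_group_slices := by
  intro fd ng _ _
  unfold Spec_group_slices
  exact group_slices_eq_alt fd ng
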